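-- pv_equiv track=rewrite | github.com/adnan8869/Python-Backend | sort.py | sorting_fast
-- ===== SOURCE A (Python) =====
-- def sorting_fast(num, k):
--     count = [0] * 10
--     for digit in str(num):
--         count[int(digit)] += 1
--
--     result_list = []
--
--     for i in range(10):
--         while count[i] > 0 and k > 0:
--             result_list.append(str(i))
--             count[i] -= 1
--             k -= 1
--
--         if k == 0:
--             break
--
--     return "".join(result_list)
-- ===== SOURCE B (Python) =====
-- def sorting_fast(num, k):
--     # comparison sort of the digit characters, then a clamped slice of the k smallest
--     return "".join(sorted(str(num)))[:max(k, 0)]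
-- ===== Notes on version B (the rewrite author's own statement) =====
-- stated objective: simpler
-- what changed: Replaces the counting-sort bucket emission (10-bucket histogram plus nested while-loop with a manual k countdown and break) by a one-liner: comparison-sort the digit characters of str(num) and slice the first max(k,0) of them.
import Mathlib
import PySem

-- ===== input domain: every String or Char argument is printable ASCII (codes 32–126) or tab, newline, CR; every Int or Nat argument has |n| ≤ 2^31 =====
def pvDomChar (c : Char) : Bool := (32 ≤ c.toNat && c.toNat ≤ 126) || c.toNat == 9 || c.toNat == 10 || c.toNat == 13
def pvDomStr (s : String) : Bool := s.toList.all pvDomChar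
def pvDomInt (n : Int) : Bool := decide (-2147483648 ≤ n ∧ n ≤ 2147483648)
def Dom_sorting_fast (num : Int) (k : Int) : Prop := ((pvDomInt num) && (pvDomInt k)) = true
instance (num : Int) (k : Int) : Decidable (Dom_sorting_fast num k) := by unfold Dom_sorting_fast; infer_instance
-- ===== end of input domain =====

-- B replaces A's 10-bucket counting-sort emission loop by "comparison-sort the digit
-- characters, then slice the first max(k,0)"; objective: simpler.

-- ===== PORT A =====
-- for digit in str(num): count[int(digit)] += 1
def pvCountLoop (cs : List Char) (count : List Int) : List Int :=
  match cs with
  | [] => count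
  | c :: rest =>
      let d : Int := (PySem.Int.ofChars? [c]).getD 0
      pvCountLoop rest (PySem.List.pySetD count d (PySem.List.pyGetD count d 0 + 1))

-- while count[i] > 0 and k > 0: result_list.append(str(i)); count[i] -= 1; k -= 1
def pvEmit1 (i : Int) (c : Int) (k : Int) (acc : List String) : List String × Int × Int :=
  if h : 0 < c ∧ 0 < k then pvEmit1 i (c - 1) (k - 1) (acc ++ [PySem.Int.toStr i]) else (acc, c, k)
  termination_by c.toNat
  decreasing_by omega

-- for i in range(10): <while …>; if k == 0: break
def pvEmit (is : List Int) (count : List Int) (k : Int) (acc : List String) : List String :=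
  match is with
  | [] => acc
  | i :: rest =>
      let r := pvEmit1 i (PySem.List.pyGetD count i 0) k acc
      if r.2.2 == 0 then r.1 else pvEmit rest (PySem.List.pySetD count i r.2.1) r.2.2 r.1

def sorting_fast (num : Int) (k : Int) : String :=
  let count := List.replicate 10 (0 : Int)
  let count := pvCountLoop (PySem.Int.toChars num) count
  PySem.Str.join "" (pvEmit (PySem.List.pyRange 0 10 1) count k [])

-- ===== PORT B =====
-- return "".join(sorted(str(num)))[:max(k, 0)]
def sorting_fast_alt (num : Int) (k : Int) : String :=
  String.ofList
    (PySem.List.slice (PySem.List.sorted (PySem.Int.toStr num).toList (fun c => c))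
      none (some (max k 0)))

-- ===== PRECONDITION & SPEC =====
-- Pre_ excludes num < 0, on which A raises ValueError (int('-') on the sign character).
def Pre_sorting_fast (num : Int) (k : Int) : Prop := 0 ≤ num
instance (num : Int) (k : Int) : Decidable (Pre_sorting_fast num k) := by unfold Pre_sorting_fast; infer_instance
def pvWitness_sorting_fast : Int × Int := (203, 2)

def Spec_sorting_fast (num : Int) (k : Int) (out : String) : Prop := out = sorting_fast_alt num k
instance (num : Int) (k : Int) (out : String) : Decidable (Spec_sorting_fast num k out) := by unfold Spec_sorting_fast; infer_instance

-- ===== CLAIM (what is proved, stated in full; the proofs are below) =====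
def Claim_equal_sorting_fast : Prop := ∀ (num : Int) (k : Int), Dom_sorting_fast num k → Pre_sorting_fast num k → Spec_sorting_fast num k (sorting_fast num k)

-- ===== LEMMAS AND PROOFS =====

-- the ten decimal digit characters, in order
def pvDigits : List Char := ['0', '1', '2', '3', '4', '5', '6', '7', '8', '9']

-- Nat.digitChar of a value < 10 is a decimal digit character
lemma pvDigitChar_mem (m : Nat) (h : m < 10) : Nat.digitChar m ∈ pvDigits := by
  interval_cases m <;> decide

lemma pvToDigitsCore_digits (f : Nat) : ∀ (n : Nat) (acc : List Char),
    (∀ c ∈ acc, c ∈ pvDigits) → ∀ c ∈ Nat.toDigitsCore 10 f n acc, c ∈ pvDigits := by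
  induction f with
  | zero =>
      intro n acc hacc c hc
      simp only [Nat.toDigitsCore] at hc
      exact hacc c hc
  | succ f ih =>
      intro n acc hacc c hc
      simp only [Nat.toDigitsCore] at hc
      have hacc' : ∀ c ∈ (n % 10).digitChar :: acc, c ∈ pvDigits := by
        intro x hx
        rcases List.mem_cons.mp hx with rfl | hx
        · exact pvDigitChar_mem _ (Nat.mod_lt _ (by norm_num))
        · exact hacc x hx
      by_cases h0 : n / 10 = 0
      · rw [if_pos h0] at hc
        exact hacc' c hc
      · rw [if_neg h0] at hc
        exact ih (n / 10) _ hacc' c hc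

-- every character of str(num) for 0 ≤ num is a decimal digit
lemma pvToChars_digits (n : Int) (h : 0 ≤ n) : ∀ c ∈ PySem.Int.toChars n, c ∈ pvDigits := by
  unfold PySem.Int.toChars
  rw [if_neg (by omega)]
  exact pvToDigitsCore_digits _ _ [] (by simp)

lemma pvOfChars_digit (c : Char) (h : c ∈ pvDigits) :
    PySem.Int.ofChars? [c] = some ((c.toNat : Int) - 48) := by
  unfold pvDigits at h
  fin_cases h <;> decide

lemma pvChar_facts (c : Char) (h : c ∈ pvDigits) : 48 ≤ c.toNat ∧ c.toNat ≤ 57 := by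
  unfold pvDigits at h
  fin_cases h <;> decide

lemma pvChar_eq_iff (c d : Char) (hc : c ∈ pvDigits) (hd : d ∈ pvDigits)
    (h : c.toNat - 48 = d.toNat - 48) : c = d := by
  unfold pvDigits at hc hd
  fin_cases hc <;> fin_cases hd <;> first | rfl | (exact absurd h (by decide))

-- the counting loop computes per-digit multiplicities
lemma pvCountLoop_spec (cs : List Char) : ∀ (count : List Int),
    (∀ c ∈ cs, c ∈ pvDigits) → count.length = 10 →
    (pvCountLoop cs count).length = 10 ∧
      ∀ d ∈ pvDigits, (pvCountLoop cs count).getD (d.toNat - 48) 0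
        = count.getD (d.toNat - 48) 0 + cs.count d := by
  induction cs with
  | nil =>
      intro count h hlen
      refine ⟨hlen, ?_⟩
      intro d _
      simp [pvCountLoop]
  | cons c rest ih =>
      intro count h hlen
      have hc : c ∈ pvDigits := h c (List.mem_cons_self ..)
      have hb := pvChar_facts c hc
      have hidx : (PySem.Int.ofChars? [c]).getD 0 = (((c.toNat - 48 : Nat)) : Int) := by
        rw [pvOfChars_digit c hc]
        simp
        omega
      simp only [pvCountLoop, hidx, PySem.List.pySetD_natCast, PySem.List.pyGetD_natCast]
      set j := c.toNat - 48 with hj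
      have hj10 : j < 10 := by omega
      have hlen' : (count.set j (count.getD j 0 + 1)).length = 10 := by simp [hlen]
      obtain ⟨hL, hS⟩ := ih _ (fun x hx => h x (List.mem_cons_of_mem _ hx)) hlen'
      refine ⟨hL, ?_⟩
      intro d hd
      rw [hS d hd]
      by_cases hcd : c = d
      · subst hcd
        have hset : (count.set j (count.getD j 0 + 1)).getD j 0 = count.getD j 0 + 1 := by
          rw [List.getD_eq_getElem?_getD, List.getElem?_set, if_pos rfl, if_pos (by omega)]
          simp
        rw [hset]
        simp
        ring
      · have hne : j ≠ d.toNat - 48 := fun hcontra => hcd (pvChar_eq_iff c d hc hd hcontra)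
        have hset : (count.set j (count.getD j 0 + 1)).getD (d.toNat - 48) 0
            = count.getD (d.toNat - 48) 0 := by
          rw [List.getD_eq_getElem?_getD, List.getElem?_set, if_neg hne,
            ← List.getD_eq_getElem?_getD]
        have hcnt : (c :: rest).count d = rest.count d := by
          simp [hcd]
        rw [hset, hcnt]

-- closed form of the inner while loop
lemma pvEmit1_eq (i : Int) : ∀ (c k : Int) (acc : List String),
    pvEmit1 i c k acc =
      (acc ++ List.replicate (max 0 (min c k)).toNat (PySem.Int.toStr i),
       c - max 0 (min c k), k - max 0 (min c k)) := by
  intro c k acc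
  induction c, k, acc using pvEmit1.induct i with
  | case1 c k acc h ih =>
      rw [pvEmit1, dif_pos h, ih]
      have h1 : (max 0 (min c k)).toNat = (max 0 (min (c - 1) (k - 1))).toNat + 1 := by omega
      have h2 : c - 1 - max 0 (min (c - 1) (k - 1)) = c - max 0 (min c k) := by omega
      have h3 : k - 1 - max 0 (min (c - 1) (k - 1)) = k - max 0 (min c k) := by omega
      rw [h1, h2, h3, List.replicate_succ]
      simp
  | case2 c k acc h =>
      rw [pvEmit1, dif_neg h]
      have hm : max 0 (min c k) = 0 := by omega
      simp [hm]

-- the bucket-emission loop is "take (max k 0) of the concatenated buckets"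
lemma pvEmit_spec (is : List Int) : ∀ (count : List Int) (k : Int) (acc : List String),
    is.Nodup → (∀ i ∈ is, 0 ≤ i ∧ i < 10) → count.length = 10 →
    pvEmit is count k acc = acc ++
      (is.flatMap (fun i =>
        List.replicate (PySem.List.pyGetD count i 0).toNat (PySem.Int.toStr i))).take
        (max k 0).toNat := by
  induction is with
  | nil =>
      intro count k acc _ _ _
      simp [pvEmit]
  | cons i rest ih =>
      intro count k acc hnd hb hlen
      obtain ⟨hi0, hi10⟩ := hb i (List.mem_cons_self ..)
      simp only [pvEmit, pvEmit1_eq]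
      set c := PySem.List.pyGetD count i 0 with hc
      set m := max 0 (min c k) with hm
      by_cases hz : k - m = 0
      · rw [if_pos (by simpa using hz)]
        rw [List.flatMap_cons, List.take_append, List.take_replicate, List.length_replicate]
        have h1 : min (max k 0).toNat c.toNat = m.toNat := by omega
        have h2 : (max k 0).toNat - c.toNat = 0 := by omega
        rw [h1, h2]
        simp
      · rw [if_neg (by simpa using hz)]
        have hset : PySem.List.pySetD count i (c - m) = count.set i.toNat (c - m) :=
          PySem.List.pySetD_of_nonneg count _ hi0
        have hlen' : (PySem.List.pySetD count i (c - m)).length = 10 := by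
          rw [hset]; simp [hlen]
        rw [ih _ _ _ (List.Nodup.of_cons hnd) (fun j hj => hb j (List.mem_cons_of_mem _ hj)) hlen']
        have hgd : ∀ j ∈ rest,
            PySem.List.pyGetD (PySem.List.pySetD count i (c - m)) j 0
              = PySem.List.pyGetD count j 0 := by
          intro j hj
          obtain ⟨hj0, _⟩ := hb j (List.mem_cons_of_mem _ hj)
          have hij : i ≠ j := by
            rintro rfl
            exact (List.nodup_cons.mp hnd).1 hj
          rw [hset, PySem.List.pyGetD_of_nonneg _ _ hj0, PySem.List.pyGetD_of_nonneg _ _ hj0,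
            List.getD_eq_getElem?_getD, List.getD_eq_getElem?_getD, List.getElem?_set,
            if_neg (by omega)]
        have hfm : rest.flatMap (fun j =>
            List.replicate (PySem.List.pyGetD (PySem.List.pySetD count i (c - m)) j 0).toNat
              (PySem.Int.toStr j))
            = rest.flatMap (fun j =>
            List.replicate (PySem.List.pyGetD count j 0).toNat (PySem.Int.toStr j)) := by
            rw [List.flatMap_def, List.flatMap_def]
            exact congrArg List.flatten (List.map_congr_left (fun j hj => by rw [hgd j hj]))
        rw [hfm, List.flatMap_cons, List.take_append, List.take_replicate, List.length_replicate]
        have h1 : min (max k 0).toNat c.toNat = m.toNat := by omega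
        have h2 : (max (k - m) 0).toNat = (max k 0).toNat - c.toNat := by omega
        rw [h1, h2, List.append_assoc]

-- the string buckets, rendered to characters, are the char buckets pointwise singleton-ised
lemma pvBlocksSingleton (n : Char → Nat) : ∀ (ds : List Char),
    (ds.flatMap (fun d => List.replicate (n d) (String.ofList [d]))).map String.toList
      = ((ds.map fun d => List.replicate (n d) d).flatten).map (fun c => [c]) := by
  intro ds
  induction ds with
  | nil => rfl
  | cons d rest ih =>
      simp only [List.flatMap_cons, List.map_cons, List.flatten_cons, List.map_append, ih,
        List.map_replicate, String.toList_ofList]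

-- multiplicity in a flattened replicate-table
lemma pvCountFlat (n : Char → Nat) (a : Char) : ∀ (ds : List Char), ds.Nodup →
    ((ds.map fun d => List.replicate (n d) d).flatten).count a
      = if a ∈ ds then n a else 0 := by
  intro ds
  induction ds with
  | nil => simp
  | cons d rest ih =>
      intro hnd
      simp only [List.map_cons, List.flatten_cons, List.count_append, List.count_replicate]
      rw [ih (List.Nodup.of_cons hnd)]
      by_cases hd : d = a
      · subst hd
        have hni : d ∉ rest := (List.nodup_cons.mp hnd).1
        simp [hni]
      · simp only [List.mem_cons]
        rw [if_neg (by simpa using hd)]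
        by_cases ha : a ∈ rest
        · simp [ha, Ne.symm hd]
        · simp [ha, Ne.symm hd]

-- a flattened replicate-table over an ordered alphabet is sorted
lemma pvPairwiseFlat (n : Char → Nat) : ∀ (ds : List Char), ds.Pairwise (· ≤ ·) →
    ((ds.map fun d => List.replicate (n d) d).flatten).Pairwise (fun a b => a ≤ b) := by
  intro ds
  induction ds with
  | nil => simp
  | cons d rest ih =>
      intro h
      simp only [List.map_cons, List.flatten_cons]
      rw [List.pairwise_append]
      refine ⟨List.pairwise_replicate.mpr (Or.inr le_rfl), ih (List.Pairwise.of_cons h), ?_⟩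
      intro x hx y hy
      have hxd := List.eq_of_mem_replicate hx
      obtain ⟨l, hl, hyl⟩ := List.mem_flatten.mp hy
      obtain ⟨d', hd', rfl⟩ := List.mem_map.mp hl
      have hyd := List.eq_of_mem_replicate hyl
      rw [hxd, hyd]
      exact (List.pairwise_cons.mp h).1 d' hd'

-- sorted(cs) is the digit-bucket table of cs when all cs are digits
lemma pvSorted_eq_flat (cs : List Char) (h : ∀ c ∈ cs, c ∈ pvDigits) :
    PySem.List.sorted cs (fun c => c)
      = ((pvDigits.map fun d => List.replicate (cs.count d) d).flatten) := by
  apply PySem.List.sorted_id_eq_of_perm_of_pairwise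
  · rw [List.perm_iff_count]
    intro a
    rw [pvCountFlat (fun d => cs.count d) a pvDigits (by decide)]
    by_cases ha : a ∈ pvDigits
    · simp [ha]
    · rw [if_neg ha]
      exact (List.count_eq_zero.mpr (fun hmem => ha (h a hmem))).symm
  · exact pvPairwiseFlat _ pvDigits (by decide)

-- ===== VERDICT (by name: the statement is the Claim_ definition above) =====
theorem sorting_fast_spec : Claim_equal_sorting_fast := by
  intro num k _ hpre
  unfold Spec_sorting_fast
  simp only [sorting_fast, sorting_fast_alt]
  have hdig := pvToChars_digits num hpre
  set cs := PySem.Int.toChars num with hcs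
  obtain ⟨hlen, hcount⟩ := pvCountLoop_spec cs (List.replicate 10 0) hdig (by simp)
  set count := pvCountLoop cs (List.replicate 10 0) with hcnt
  have hget : ∀ d ∈ pvDigits, count.getD (d.toNat - 48) 0 = (cs.count d : Int) := by
    intro d hd
    have hz : (List.replicate 10 (0 : Int)).getD (d.toNat - 48) 0 = 0 :=
      List.getD_replicate _ (by have := pvChar_facts d hd; omega)
    rw [hcount d hd, hz, zero_add]
  have hrange : PySem.List.pyRange 0 10 1 = [0, 1, 2, 3, 4, 5, 6, 7, 8, 9] := by decide
  rw [hrange, pvEmit_spec _ count k [] (by decide) (by decide) hlen]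
  have hFULL : (([0, 1, 2, 3, 4, 5, 6, 7, 8, 9] : List Int).flatMap (fun i =>
        List.replicate (PySem.List.pyGetD count i 0).toNat (PySem.Int.toStr i)))
      = pvDigits.flatMap (fun d => List.replicate (cs.count d) (String.ofList [d])) := by
    have h1 : ([0, 1, 2, 3, 4, 5, 6, 7, 8, 9] : List Int)
        = pvDigits.map (fun d => (d.toNat : Int) - 48) := by decide
    rw [h1, List.flatMap_def, List.flatMap_def, List.map_map]
    congr 1
    apply List.map_congr_left
    intro d hd
    have hb := pvChar_facts d hd
    have ha : PySem.List.pyGetD count ((d.toNat : Int) - 48) 0 = (cs.count d : Int) := by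
      rw [PySem.List.pyGetD_of_nonneg _ _ (by omega)]
      have hn : ((d.toNat : Int) - 48).toNat = d.toNat - 48 := by omega
      rw [hn, hget d hd]
    have hs : PySem.Int.toStr ((d.toNat : Int) - 48) = String.ofList [d] := by
      unfold pvDigits at hd
      fin_cases hd <;> decide
    simp [Function.comp, ha, hs]
  rw [hFULL]
  rw [← String.toList_inj]
  rw [PySem.Str.toList_join]
  have hsep : ("" : String).toList = [] := rfl
  rw [hsep, List.nil_append, List.map_take, pvBlocksSingleton, ← List.map_take,
    PySem.Chars.join_nil_singletons]
  rw [String.toList_ofList, PySem.List.slice_to _ (by omega), PySem.Int.toList_toStr, ← hcs,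
    pvSorted_eq_flat cs hdig]
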